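-- pv_equiv track=rewrite | github.com/omer38/CS115 | lab05/Lab05_Tugrul_Omer/Lab5Q1.py | sameFirstLast
-- ===== SOURCE A (Python) =====
-- def sameFirstLast(string):
--     """
--     Takes sentence of words and returns tuple of words which starts and end with same characters.
--     Parameter: string type: str
--     Return: tup type: tuple
--     """
--     tup =()
--     count=0
--     pos1=string.find(' ')
--     while pos1!= -1:
--         text=string[count:pos1]
--         if text[0].lower() ==text[-1].lower():
--             tup+=(text,)
--         count=pos1+1
--         pos1=string.find(' ',count)
--     return tup
-- ===== SOURCE B (Python) =====
-- def sameFirstLast(string):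
--     words = string.split(' ')[:-1]
--     return tuple(w for w in words if w[0].lower() == w[-1].lower())
-- ===== Notes on version B (the rewrite author's own statement) =====
-- stated objective: idiomatic
-- what changed: Replaces the manual find(' ')/slice cursor loop with a split-then-filter decomposition: build the word list once with string.split(' ')[:-1] and keep the words whose first and last characters match case-insensitively.
import Mathlib
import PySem

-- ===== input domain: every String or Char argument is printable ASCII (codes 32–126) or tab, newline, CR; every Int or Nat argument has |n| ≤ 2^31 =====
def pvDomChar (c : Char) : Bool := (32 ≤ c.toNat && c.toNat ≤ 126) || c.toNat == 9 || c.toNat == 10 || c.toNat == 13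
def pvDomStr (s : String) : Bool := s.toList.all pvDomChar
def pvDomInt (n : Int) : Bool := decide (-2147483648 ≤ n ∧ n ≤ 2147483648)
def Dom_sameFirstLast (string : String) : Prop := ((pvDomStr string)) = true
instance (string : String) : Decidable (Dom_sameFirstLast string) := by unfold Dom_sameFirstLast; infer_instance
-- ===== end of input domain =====

-- ===== PORT A =====
-- B rewrites A's manual find(' ')/slice cursor loop as split-then-filter (idiomatic; same cost).
-- A's while loop over `pos1 = string.find(' ', count)`: fuel-bounded recursion (fuel = len+1 always
-- suffices, proved below); `none` = the IndexError `text[0]` raises on an empty segment (excluded by Pre_).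
def sameFirstLastLoop (s : List Char) (count : Nat) : Nat → Option (List (List Char))
  | 0 => none
  | fuel + 1 =>
    let pos1 : Int := PySem.Chars.findFrom s [' '] (count : Int) none
    if pos1 = -1 then some []
    else
      let text := PySem.List.slice s (some (count : Int)) (some pos1)
      match PySem.List.pyGet? text 0, PySem.List.pyGet? text (-1) with
      | some a, some b =>
        (sameFirstLastLoop s (pos1.toNat + 1) fuel).map
          (fun tup => if PySem.Chars.lowerChar a = PySem.Chars.lowerChar b then text :: tup else tup)
      | _, _ => none

def sameFirstLast (string : String) : List String :=
  ((sameFirstLastLoop string.toList 0 (string.toList.length + 1)).getD []).map String.ofList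

-- ===== PORT B =====
-- Source B: words = string.split(' ')[:-1]; keep w with w[0].lower() == w[-1].lower().
-- split(' ') is ported as the library List.splitOn ' '; w[0]/w[-1] as head?/getLast? (exact on the
-- nonempty words Pre_ admits; Python raises IndexError on an empty word, excluded by Pre_).
def sameFirstLast_alt (string : String) : List String :=
  let words := (string.toList.splitOn ' ').dropLast
  (words.filter fun w =>
      w.head?.map PySem.Chars.lowerChar == w.getLast?.map PySem.Chars.lowerChar).map String.ofList

-- ===== PRECONDITION & SPEC =====
-- Pre_ excludes exactly the strings with an empty segment before a space (leading space or two
-- adjacent spaces): there BOTH Pythons raise IndexError on text[0] / w[0].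
def Pre_sameFirstLast (string : String) : Prop :=
  ∀ w ∈ (string.toList.splitOn ' ').dropLast, w ≠ []
instance (string : String) : Decidable (Pre_sameFirstLast string) := by
  unfold Pre_sameFirstLast; infer_instance
def pvWitness_sameFirstLast : String := "aba bc x "

def Spec_sameFirstLast (string : String) (out : List String) : Prop := out = sameFirstLast_alt string
instance (string : String) (out : List String) : Decidable (Spec_sameFirstLast string out) := by unfold Spec_sameFirstLast; infer_instance

-- ===== CLAIM (what is proved, stated in full; the proofs are below) =====
def Claim_equal_sameFirstLast : Prop := ∀ (string : String), Dom_sameFirstLast string → Pre_sameFirstLast string → Spec_sameFirstLast string (sameFirstLast string)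

-- ===== LEMMAS AND PROOFS =====

theorem pyGet?_zero_head? {α : Type} (w : List α) : PySem.List.pyGet? w 0 = w.head? := by
  cases w <;> simp [PySem.List.pyGet?, PySem.List.pyIdx?]

theorem pyGet?_neg_one_getLast? {α : Type} (w : List α) :
    PySem.List.pyGet? w (-1) = w.getLast? := by
  cases w <;> simp [PySem.List.pyGet?, PySem.List.pyIdx?, List.getLast?_eq_getElem?]

theorem singleton_prefix_drop (t : List Char) (i : Nat) (c : Char) :
    ([c] <+: t.drop i) ↔ t[i]? = some c := by
  rw [← List.head?_drop]
  cases t.drop i with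
  | nil => simp
  | cons a l => simp [List.cons_prefix_cons, eq_comm]

-- no space in t: split(' ') gives the single segment t
theorem split_single (t : List Char) (h : PySem.Chars.find t [' '] = -1) :
    t.splitOn ' ' = [t] := by
  rw [List.splitOn]
  refine List.splitOnP_eq_single _ _ (fun x hx hxs => ?_)
  have hx' : x = ' ' := by simpa using hxs
  exact (PySem.Chars.find_eq_neg_one_iff t [' ']).mp h
    ((List.singleton_infix_iff ' ' t).mpr (hx' ▸ hx))

-- first space at index k: split(' ') peels off the word before it
theorem split_decomp (t : List Char) (h : PySem.Chars.find t [' '] ≠ -1) :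
    (PySem.Chars.find t [' ']).toNat < t.length ∧
    t.splitOn ' ' = t.take (PySem.Chars.find t [' ']).toNat ::
      (t.drop ((PySem.Chars.find t [' ']).toNat + 1)).splitOn ' ' := by
  have h0 : 0 ≤ PySem.Chars.find t [' '] := by
    have := PySem.Chars.neg_one_le_find t [' ']
    omega
  obtain ⟨hpref, hmin⟩ := PySem.Chars.find_spec h0
  have htk : t[(PySem.Chars.find t [' ']).toNat]? = some ' ' :=
    (singleton_prefix_drop t _ ' ').mp hpref
  obtain ⟨hklt, hget⟩ := List.getElem?_eq_some_iff.mp htk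
  refine ⟨hklt, ?_⟩
  have hnosp : ∀ x ∈ t.take (PySem.Chars.find t [' ']).toNat, ¬ (x == ' ') = true := by
    intro x hx hxs
    have hx' : x = ' ' := by simpa using hxs
    obtain ⟨i, hi, hix⟩ := List.mem_take_iff_getElem.mp hx
    refine hmin i (by omega) ((singleton_prefix_drop t i ' ').mpr ?_)
    rw [List.getElem?_eq_getElem (by omega), hix, hx']
  conv_lhs => rw [← List.take_append_drop (PySem.Chars.find t [' ']).toNat t,
    List.drop_eq_getElem_cons hklt, hget]
  rw [List.splitOn, List.splitOnP_append_cons _ _ _ _ (by simp),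
    List.splitOnP_eq_single _ _ hnosp]
  rfl

-- the loop of A computes B's filtered word list (under Pre_ for the remaining suffix)
theorem loop_split (s : List Char) : ∀ (fuel count : Nat), count ≤ s.length →
    s.length - count < fuel →
    (∀ w ∈ ((s.drop count).splitOn ' ').dropLast, w ≠ []) →
    sameFirstLastLoop s count fuel =
      some ((((s.drop count).splitOn ' ').dropLast).filter
        (fun w => w.head?.map PySem.Chars.lowerChar == w.getLast?.map PySem.Chars.lowerChar)) := by
  intro fuel
  induction fuel with
  | zero => intro count hc hf _; omega
  | succ fuel ih =>
    intro count hc hf hpre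
    rw [sameFirstLastLoop]
    simp only [PySem.Chars.findFrom_natCast s [' '] count hc]
    by_cases h : PySem.Chars.find (s.drop count) [' '] = -1
    · rw [split_single _ h]
      simp [h]
    · obtain ⟨hklt, hsplit⟩ := split_decomp _ h
      simp only [if_neg h]
      have h0 : 0 ≤ PySem.Chars.find (s.drop count) [' '] := by
        have := PySem.Chars.neg_one_le_find (s.drop count) [' ']
        omega
      have hlen : (s.drop count).length = s.length - count := by simp
      set k := (PySem.Chars.find (s.drop count) [' ']).toNat with hk
      have hfk : PySem.Chars.find (s.drop count) [' '] = (k : Int) := by omega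
      have hdl : ((s.drop count).splitOn ' ').dropLast
          = (s.drop count).take k :: (((s.drop count).drop (k + 1)).splitOn ' ').dropLast := by
        rw [hsplit, List.dropLast_cons_of_ne_nil]
        rw [List.splitOn]
        exact List.splitOnP_ne_nil _ _
      have hwne : (s.drop count).take k ≠ [] :=
        hpre _ (by rw [hdl]; exact List.mem_cons_self)
      have hpos : ¬ ((count : Int) + PySem.Chars.find (s.drop count) [' '] = -1) := by omega
      rw [if_neg hpos]
      have hslice : PySem.List.slice s (some (count : Int))
          (some ((count : Int) + PySem.Chars.find (s.drop count) [' '])) = (s.drop count).take k := by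
        rw [hfk, PySem.List.slice_natCast_add s count k]
      rw [hslice, pyGet?_zero_head?, pyGet?_neg_one_getLast?,
        List.head?_eq_some_head hwne, List.getLast?_eq_some_getLast hwne]
      have htoNat : ((count : Int) + PySem.Chars.find (s.drop count) [' ']).toNat + 1
          = count + (k + 1) := by omega
      have hdrop : s.drop (count + (k + 1)) = (s.drop count).drop (k + 1) := by
        rw [List.drop_drop]
      have hpre' : ∀ w ∈ ((s.drop (count + (k + 1))).splitOn ' ').dropLast, w ≠ [] := by
        rw [hdrop]; intro w hw
        exact hpre w (by rw [hdl]; exact List.mem_cons_of_mem _ hw)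
      rw [htoNat, ih (count + (k + 1)) (by omega) (by omega) hpre', hdrop, hdl]
      simp only [List.filter_cons, Option.map_some, List.head?_eq_some_head hwne,
        List.getLast?_eq_some_getLast hwne]
      by_cases hcond : PySem.Chars.lowerChar (((s.drop count).take k).head hwne)
          = PySem.Chars.lowerChar (((s.drop count).take k).getLast hwne)
      · simp [hcond]
      · simp [hcond]

-- ===== VERDICT (by name: the statement is the Claim_ definition above) =====
theorem sameFirstLast_spec : Claim_equal_sameFirstLast := by
  unfold Claim_equal_sameFirstLast
  intro string _ hpre
  unfold Spec_sameFirstLast sameFirstLast sameFirstLast_alt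
  rw [loop_split string.toList (string.toList.length + 1) 0 (by omega) (by omega)
    (by simpa using hpre)]
  simp
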